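-- pv_equiv track=rewrite | github.com/jeff87654/Lifting | check_pending.py | expected_combos
-- ===== SOURCE A (Python) =====
-- from math import comb
--
-- NR_TG = {
--     2: 1, 3: 2, 4: 5, 5: 5, 6: 16, 7: 7, 8: 50,
--     9: 34, 10: 45, 11: 8, 12: 301, 13: 9, 14: 63,
--     15: 104, 16: 1954, 17: 10, 18: 983,
-- }
--
-- def expected_combos(partition):
--     """Number of non-decreasing-TI orderings for sorted partition.
--
--     Parts with the same degree are constrained to non-decreasing TI across
--     adjacent positions (IterateCombinations rule). Groups of equal parts
--     each contribute C(n+k-1, k) where n=NrTransitiveGroups(d), k=multiplicity.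
--     Distinct-degree blocks multiply.
--     """
--     counts = {}
--     for d in partition:
--         counts[d] = counts.get(d, 0) + 1
--     total = 1
--     for d, k in counts.items():
--         total *= comb(NR_TG[d] + k - 1, k)
--     return total
-- ===== SOURCE B (Python) =====
-- NR_TG = {
--     2: 1, 3: 2, 4: 5, 5: 5, 6: 16, 7: 7, 8: 50,
--     9: 34, 10: 45, 11: 8, 12: 301, 13: 9, 14: 63,
--     15: 104, 16: 1954, 17: 10, 18: 983,
-- }
--
-- def expected_combos(partition):
--     """Sort the partition and scan it once: each maximal run of an equal
--     degree d of length k contributes C(NR_TG[d]+k-1, k), computed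
--     incrementally as p = p*(n+j-1)//j, without a counts dict or math.comb."""
--     s = sorted(partition)
--     total = 1
--     i = 0
--     m = len(s)
--     while i < m:
--         d = s[i]
--         n = NR_TG[d]
--         j = 0
--         p = 1
--         while i < m and s[i] == d:
--             j += 1
--             p = p * (n + j - 1) // j
--             i += 1
--         total *= p
--     return total
-- ===== Notes on version B (the rewrite author's own statement) =====
-- stated objective: alternative
-- what changed: B replaces A's counts-dict pass plus math.comb per distinct degree by sorting the partition and scanning it once, accumulating each maximal run's multiset coefficient C(n+k-1,k) incrementally via exact integer division p = p*(n+j-1)//j.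
import Mathlib
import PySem

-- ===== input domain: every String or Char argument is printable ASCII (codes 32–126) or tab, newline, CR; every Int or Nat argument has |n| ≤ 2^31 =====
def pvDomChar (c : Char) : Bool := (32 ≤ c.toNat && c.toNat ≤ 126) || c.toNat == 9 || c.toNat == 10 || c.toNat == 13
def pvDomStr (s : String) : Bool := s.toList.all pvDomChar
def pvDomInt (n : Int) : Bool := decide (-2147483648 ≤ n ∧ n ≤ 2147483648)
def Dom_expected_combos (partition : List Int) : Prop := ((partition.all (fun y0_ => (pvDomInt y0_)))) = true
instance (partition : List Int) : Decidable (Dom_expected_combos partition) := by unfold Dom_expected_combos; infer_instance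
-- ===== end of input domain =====

-- B replaces A's counts dict + math.comb by a single scan of the sorted partition, accumulating each
-- run's multiset-coefficient incrementally by exact integer division (objective: alternative).

-- ===== PORT A =====
def pvNRTG : PySem.Dict Int Int :=
  PySem.Dict.ofList [(2,1),(3,2),(4,5),(5,5),(6,16),(7,7),(8,50),(9,34),(10,45),(11,8),(12,301),(13,9),(14,63),(15,104),(16,1954),(17,10),(18,983)]

-- math.comb(n, k); inside Pre_ both arguments are nonnegative, where toNat is exact
def pvComb (n k : Int) : Int := (Nat.choose n.toNat k.toNat : Int)

def expected_combos (partition : List Int) : Int :=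
  let counts := partition.foldl (fun d x => d.insert x (d.getD x 0 + 1)) PySem.Dict.empty
  counts.items.foldl (fun total dk => total * pvComb (pvNRTG.getD dk.1 0 + dk.2 - 1) dk.2) 1

-- ===== PORT B =====
-- inner while loop of Source B: consume the run of elements equal to d, updating j and p
def pvRun (n d : Int) : List Int → Int → Int → Int × List Int
  | [], _j, p => (p, [])
  | x :: xs, j, p =>
    if x = d then pvRun n d xs (j + 1) (PySem.Int.floordiv (p * (n + (j + 1) - 1)) (j + 1))
    else (p, x :: xs)

lemma pvRun_snd_length_le (n d : Int) : ∀ (xs : List Int) (j p : Int),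
    (pvRun n d xs j p).2.length ≤ xs.length := by
  intro xs
  induction xs with
  | nil => intro j p; simp [pvRun]
  | cons x xs ih =>
    intro j p
    by_cases h : x = d <;> simp [pvRun, h]
    exact le_trans (ih _ _) (Nat.le_succ _)

-- outer while loop of Source B, with `total` as accumulator
def expected_combos_altGo (s : List Int) (total : Int) : Int :=
  match s with
  | [] => total
  | x :: xs =>
    let n := pvNRTG.getD x 0
    let r := pvRun n x (x :: xs) 0 1
    expected_combos_altGo r.2 (total * r.1)
termination_by s.length
decreasing_by
  simp only [pvRun]
  exact Nat.lt_succ_of_le (pvRun_snd_length_le _ _ _ _ _)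

def expected_combos_alt (partition : List Int) : Int :=
  expected_combos_altGo (PySem.List.sorted partition (fun y => y) false) 1

-- ===== PRECONDITION & SPEC =====
-- Pre_ excludes exactly the inputs where A raises KeyError: a degree outside the NR_TG table (keys 2..18)
def Pre_expected_combos (partition : List Int) : Prop := ∀ d ∈ partition, 2 ≤ d ∧ d ≤ 18
instance (partition : List Int) : Decidable (Pre_expected_combos partition) := by
  unfold Pre_expected_combos; infer_instance

def pvWitness_expected_combos : List Int := [5, 3, 5, 2]

def Spec_expected_combos (partition : List Int) (out : Int) : Prop := out = expected_combos_alt partition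
instance (partition : List Int) (out : Int) : Decidable (Spec_expected_combos partition out) := by
  unfold Spec_expected_combos; infer_instance

-- ===== CLAIM (what is proved, stated in full; the proofs are below) =====
def Claim_equal_expected_combos : Prop := ∀ (partition : List Int), Dom_expected_combos partition → Pre_expected_combos partition → Spec_expected_combos partition (expected_combos partition)

-- ===== LEMMAS AND PROOFS =====

-- the multiset coefficient C(n+k-1, k)
def pvMC (n k : Nat) : Nat := (n + k - 1).choose k

-- per-degree factor both programs multiply: C(NR_TG[d] + count d - 1, count d)
def pvG (xs : List Int) (d : Int) : Int := (pvMC (pvNRTG.getD d 0).toNat (xs.count d) : Int)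

lemma pvNRTG_pos {d : Int} (h2 : 2 ≤ d) (h18 : d ≤ 18) : 1 ≤ pvNRTG.getD d 0 := by
  interval_cases d <;> decide

lemma pvMC_step (n k : Nat) : pvMC n k * (n + k) = pvMC n (k + 1) * (k + 1) := by
  unfold pvMC
  rcases Nat.eq_zero_or_pos n with hn | hn
  · subst hn
    cases k with
    | zero => simp
    | succ j =>
      rw [Nat.choose_eq_zero_of_lt (show 0 + (j + 1) - 1 < j + 1 by omega),
        Nat.choose_eq_zero_of_lt (show 0 + (j + 1 + 1) - 1 < j + 1 + 1 by omega)]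
      simp
  · have hm : n + k = (n + k - 1) + 1 := by omega
    have hm2 : n + (k + 1) - 1 = (n + k - 1) + 1 := by omega
    rw [hm2, hm, mul_comm]
    exact Nat.add_one_mul_choose_eq (n + k - 1) k

lemma pvRun_spec (n : Nat) (d : Int) : ∀ (xs : List Int) (k : Nat),
    pvRun (n : Int) d xs (k : Int) (pvMC n k : Int) =
      ((pvMC n (k + (xs.takeWhile (fun y => decide (y = d))).length) : Int),
        xs.dropWhile (fun y => decide (y = d))) := by
  intro xs
  induction xs with
  | nil => intro k; simp [pvRun]
  | cons x xs ih =>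
    intro k
    by_cases h : x = d
    · have harg : ((pvMC n k : Int) * ((n : Int) + ((k : Int) + 1) - 1)) / ((k : Int) + 1)
          = (pvMC n (k + 1) : Int) := by
        have h1 : ((n : Int) + ((k : Int) + 1) - 1) = ((n + k : Nat) : Int) := by push_cast; ring
        have h2 : (pvMC n k : Int) * ((n + k : Nat) : Int) = ((pvMC n (k + 1) * (k + 1) : Nat) : Int) := by
          rw [← pvMC_step]; push_cast; ring
        rw [h1, h2]
        push_cast
        rw [mul_comm ((pvMC n (k+1) : Int))]
        exact Int.mul_ediv_cancel_left _ (by positivity)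
      have hk1 : ((k : Int) + 1) = ((k + 1 : Nat) : Int) := by push_cast; ring
      simp only [pvRun, if_pos h,
        PySem.Int.floordiv_eq_ediv_of_pos (show (0:Int) < (k:Int)+1 by positivity)]
      rw [harg, hk1, ih (k + 1)]
      have hlen : k + 1 + (List.takeWhile (fun y => decide (y = d)) xs).length
          = k + (List.takeWhile (fun y => decide (y = d)) (x :: xs)).length := by
        simp [h]; omega
      simp [h, hlen]
    · simp [pvRun, h]

lemma lt_of_mem_dropWhile_sorted {x : Int} : ∀ {xs : List Int},
    (x :: xs).Pairwise (· ≤ ·) →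
    ∀ y ∈ xs.dropWhile (fun z => decide (z = x)), x < y := by
  intro xs
  induction xs with
  | nil => intro _ y hy; simp at hy
  | cons a xs ih =>
    intro h y hy
    rcases List.pairwise_cons.1 h with ⟨hxa, hax⟩
    by_cases ha : a = x
    · subst ha
      rw [List.dropWhile_cons_of_pos (by simp)] at hy
      exact ih hax y hy
    · rw [List.dropWhile_cons_of_neg (by simp [ha])] at hy
      have hxlt : x < a := lt_of_le_of_ne (hxa a (by simp)) (fun he => ha he.symm)
      rcases List.mem_cons.1 hy with rfl | hy'
      · exact hxlt
      · exact lt_of_lt_of_le hxlt ((List.pairwise_cons.1 hax).1 y hy')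

lemma foldl_mul_eq_prod (f : Int × Int → Int) : ∀ (l : List (Int × Int)) (init : Int),
    l.foldl (fun t dk => t * f dk) init = init * (l.map f).prod := by
  intro l
  induction l with
  | nil => intro init; simp
  | cons a l ih => intro init; simp [ih, mul_assoc]

lemma altGo_spec : ∀ (N : Nat) (s : List Int), s.length ≤ N → ∀ (total : Int),
    s.Pairwise (· ≤ ·) → (∀ d ∈ s, 1 ≤ pvNRTG.getD d 0) →
    expected_combos_altGo s total = total * ((PySem.Set.ofList s).map (pvG s)).prod := by
  intro N
  induction N with
  | zero =>
    intro s hlen total _ _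
    rw [List.length_eq_zero_iff.1 (Nat.le_zero.1 hlen)]
    simp [expected_combos_altGo, PySem.Set.ofList]
  | succ N ihN =>
    intro s hlen total hs hpre
    match s with
    | [] => simp [expected_combos_altGo, PySem.Set.ofList]
    | x :: xs =>
      set t := xs.takeWhile (fun y => decide (y = x)) with ht_def
      set rest := xs.dropWhile (fun y => decide (y = x)) with hrest_def
      set L := t.length with hL_def
      have hn1 : 1 ≤ pvNRTG.getD x 0 := hpre x (by simp)
      set n : Int := pvNRTG.getD x 0 with hn_def
      set n' : Nat := n.toNat with hn'_def
      have hcast : (n' : Int) = n := by omega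
      -- the run loop consumes the leading run and produces the multiset coefficient
      have hrun : pvRun n x (x :: xs) 0 1 = ((pvMC n' (1 + L) : Int), rest) := by
        have h0 : pvRun n x (x :: xs) 0 1
            = pvRun n x xs (0 + 1) (PySem.Int.floordiv (1 * (n + (0 + 1) - 1)) (0 + 1)) := by
          simp [pvRun]
        have h1 : PySem.Int.floordiv (1 * (n + (0 + 1) - 1)) ((0:Int) + 1) = n := by
          rw [PySem.Int.floordiv_eq_ediv_of_pos (by norm_num)]
          norm_num
        have h3 : pvMC n' 1 = n' := by
          unfold pvMC
          rw [show n' + 1 - 1 = n' from rfl, Nat.choose_one_right]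
        rw [h0, h1, show ((0:Int) + 1) = ((1 : Nat) : Int) by norm_num, ← hcast]
        have hspec := pvRun_spec n' x xs 1
        rw [h3] at hspec
        exact hspec
      -- facts about the decomposition xs = t ++ rest
      have hxs : xs = t ++ rest := (List.takeWhile_append_dropWhile).symm
      have ht : ∀ y ∈ t, y = x := by
        intro y hy
        have := List.mem_takeWhile_imp hy
        simpa using this
      have hxr : ∀ y ∈ rest, x < y := lt_of_mem_dropWhile_sorted hs
      have hxnotin : x ∉ rest := fun hmem => lt_irrefl x (hxr x hmem)
      have hsub : rest.Sublist xs := hrest_def ▸ List.dropWhile_sublist _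
      have hpair : rest.Pairwise (· ≤ ·) := (List.pairwise_cons.1 hs).2.sublist hsub
      have hcountx : (x :: xs).count x = 1 + L := by
        have h1 : t.count x = t.length := List.count_eq_length.2 (fun b hb => ((ht b hb) ▸ rfl))
        have h2 : rest.count x = 0 := List.count_eq_zero.2 hxnotin
        rw [List.count_cons_self, hxs, List.count_append, h1, h2]
        omega
      have hcountd : ∀ d ∈ rest, (x :: xs).count d = rest.count d := by
        intro d hd
        have hdx : d ≠ x := fun he => lt_irrefl x (he ▸ hxr d hd)
        have h1 : t.count d = 0 := List.count_eq_zero.2 (fun hmem => hdx (ht d hmem))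
        rw [List.count_cons, hxs, List.count_append, h1]
        simp [Ne.symm hdx]
      -- distinct elements of x :: xs are x and those of rest
      have hperm : (PySem.Set.ofList (x :: xs)).Perm (x :: PySem.Set.ofList rest) := by
        refine (List.perm_ext_iff_of_nodup (PySem.Set.nodup_ofList _) ?_).2 ?_
        · exact List.nodup_cons.2
            ⟨fun hm => hxnotin ((PySem.Set.mem_ofList _ _).1 hm), PySem.Set.nodup_ofList _⟩
        · intro a
          simp only [PySem.Set.mem_ofList, List.mem_cons]
          constructor
          · rintro (rfl | ha)
            · exact Or.inl rfl
            · by_cases hax : a = x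
              · exact Or.inl hax
              · refine Or.inr ?_
                rw [hxs] at ha
                rcases List.mem_append.1 ha with hat | har
                · exact absurd (ht a hat) hax
                · exact har
          · rintro (rfl | ha)
            · exact Or.inl rfl
            · exact Or.inr (hxs ▸ List.mem_append.2 (Or.inr ha))
      have hmapeq : (PySem.Set.ofList rest).map (pvG (x :: xs))
          = (PySem.Set.ofList rest).map (pvG rest) := by
        refine List.map_congr_left ?_
        intro d hd
        unfold pvG
        rw [hcountd d ((PySem.Set.mem_ofList _ _).1 hd)]
      have hgx : pvG (x :: xs) x = (pvMC n' (1 + L) : Int) := by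
        unfold pvG
        rw [hcountx, ← hn_def, ← hn'_def]
      calc expected_combos_altGo (x :: xs) total
          = expected_combos_altGo rest (total * (pvMC n' (1 + L) : Int)) := by
            rw [expected_combos_altGo, ← hn_def, hrun]
        _ = total * (pvMC n' (1 + L) : Int) * ((PySem.Set.ofList rest).map (pvG rest)).prod := by
            refine ihN rest ?_ _ hpair (fun d hd => hpre d (List.mem_cons_of_mem _ (hsub.mem hd)))
            have := hsub.length_le
            simp at hlen
            omega
        _ = total * ((PySem.Set.ofList (x :: xs)).map (pvG (x :: xs))).prod := by
            rw [(hperm.map (pvG (x :: xs))).prod_eq, List.map_cons, List.prod_cons, hmapeq, hgx]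
            ring

lemma A_eq_prod (partition : List Int) (hpre : Pre_expected_combos partition) :
    expected_combos partition = ((PySem.Set.ofList partition).map (pvG partition)).prod := by
  unfold expected_combos
  rw [PySem.Dict.foldl_insert_getD_add_one_eq_counter]
  show List.foldl _ 1 (PySem.Dict.counter partition).items = _
  rw [PySem.Dict.items_counter, foldl_mul_eq_prod, List.map_map, one_mul]
  refine congrArg List.prod (List.map_congr_left ?_)
  intro k hk
  have hkmem : k ∈ partition := (PySem.Set.mem_ofList _ _).1 hk
  obtain ⟨h2, h18⟩ := hpre k hkmem
  have hn : 1 ≤ pvNRTG.getD k 0 := pvNRTG_pos h2 h18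
  simp only [Function.comp, pvComb, pvG, pvMC]
  have hargs1 : (pvNRTG.getD k 0 + (partition.count k : Int) - 1).toNat
      = (pvNRTG.getD k 0).toNat + partition.count k - 1 := by omega
  have hargs2 : ((partition.count k : Int)).toNat = partition.count k := by omega
  rw [hargs1, hargs2]

-- ===== VERDICT (by name: the statement is the Claim_ definition above) =====
theorem expected_combos_spec : Claim_equal_expected_combos := by
  intro partition _hdom hpre
  unfold Spec_expected_combos
  set s := PySem.List.sorted partition (fun y => y) false with hs_def
  have hperm : s.Perm partition := PySem.List.sorted_perm _ _ _
  have hpair : s.Pairwise (· ≤ ·) := by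
    have := PySem.List.sorted_pairwise (xs := partition) (key := fun y => y)
    simpa using this
  have hpre' : ∀ d ∈ s, 1 ≤ pvNRTG.getD d 0 := by
    intro d hd
    obtain ⟨h2, h18⟩ := hpre d (hperm.mem_iff.1 hd)
    exact pvNRTG_pos h2 h18
  rw [A_eq_prod partition hpre]
  unfold expected_combos_alt
  rw [← hs_def, altGo_spec s.length s le_rfl 1 hpair hpre', one_mul]
  have hgfun : pvG s = pvG partition := funext fun d => by
    unfold pvG; rw [hperm.count_eq]
  have hsetperm : (PySem.Set.ofList partition).Perm (PySem.Set.ofList s) := by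
    refine (List.perm_ext_iff_of_nodup (PySem.Set.nodup_ofList _) (PySem.Set.nodup_ofList _)).2 ?_
    intro a
    simp only [PySem.Set.mem_ofList]
    exact hperm.mem_iff.symm
  rw [hgfun, ← (hsetperm.map (pvG partition)).prod_eq]
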